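-- pv_equiv track=rewrite | github.com/mromanella/advent_of_code_2020 | day_6/answer.py | separate_groups
-- ===== SOURCE A (Python) =====
-- from typing import List, Set
--
-- def separate_groups(lines: List[str]) -> List[Set[str]]:
--     group = []
--     groups = []
--     for line in lines:
--         if line == '\n' or line == '':
--             groups.append(group)
--             group = []
--         else:
--             group.append(set(line))
--     groups.append(group)
--     return groups
-- ===== SOURCE B (Python) =====
-- from typing import List, Set
--
--
-- def separate_groups(lines: List[str]) -> List[Set[str]]:
--     # Two-phase: locate separator lines first, then slice the segments between them.
--     seps = [i for i, l in enumerate(lines) if l == '\n' or l == '']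
--     starts = [0] + [s + 1 for s in seps]
--     stops = seps + [len(lines)]
--     return [[set(l) for l in lines[a:b]] for a, b in zip(starts, stops)]
-- ===== Notes on version B (the rewrite author's own statement) =====
-- stated objective: alternative
-- what changed: B first computes the indices of all separator lines in one enumerate pass and then builds each group by slicing the segment between consecutive separators, instead of A's single accumulator loop that appends line-by-line and flushes on separators.
import Mathlib
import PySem

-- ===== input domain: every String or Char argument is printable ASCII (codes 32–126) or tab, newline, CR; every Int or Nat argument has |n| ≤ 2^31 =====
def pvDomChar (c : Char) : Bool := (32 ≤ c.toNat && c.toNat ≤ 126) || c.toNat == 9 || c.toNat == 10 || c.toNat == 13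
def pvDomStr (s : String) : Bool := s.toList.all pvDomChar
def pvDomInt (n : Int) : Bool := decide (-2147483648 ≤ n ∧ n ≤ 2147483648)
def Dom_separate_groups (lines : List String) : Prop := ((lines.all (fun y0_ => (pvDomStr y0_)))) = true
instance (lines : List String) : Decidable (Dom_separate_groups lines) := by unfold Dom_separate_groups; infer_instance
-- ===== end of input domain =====

-- B re-slices segments between precomputed separator indices instead of A's line-by-line
-- accumulator loop (objective: alternative decomposition, same cost).

-- ===== PORT A =====
-- set(line) : the distinct characters of the line, as 1-character strings
def setOfLine (line : String) : List String :=
  PySem.Set.ofList (line.toList.map (fun c => String.ofList [c]))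

def separate_groups (lines : List String) : List (List (List String)) :=
  let st := lines.foldl
    (fun (st : List (List String) × List (List (List String))) line =>
      if line == "\n" || line == "" then (([] : List (List String)), st.2 ++ [st.1])
      else (st.1 ++ [setOfLine line], st.2))
    ([], [])
  st.2 ++ [st.1]

-- ===== PORT B =====
def separate_groups_alt (lines : List String) : List (List (List String)) :=
  let seps : List Int :=
    ((PySem.List.enumerate lines).filter (fun p => p.2 == "\n" || p.2 == "")).map (fun p => p.1)
  let starts : List Int := 0 :: seps.map (fun s => s + 1)
  let stops : List Int := seps ++ [(lines.length : Int)]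
  (starts.zip stops).map
    (fun p => (PySem.List.slice lines (some p.1) (some p.2)).map setOfLine)

-- ===== PRECONDITION & SPEC =====
def Spec_separate_groups (lines : List String) (out : List (List (List String))) : Prop := out = separate_groups_alt lines
instance (lines : List String) (out : List (List (List String))) : Decidable (Spec_separate_groups lines out) := by unfold Spec_separate_groups; infer_instance

-- ===== CLAIM (what is proved, stated in full; the proofs are below) =====
def Claim_equal_separate_groups : Prop := ∀ (lines : List String), Dom_separate_groups lines → Spec_separate_groups lines (separate_groups lines)

-- ===== LEMMAS AND PROOFS =====

-- Common recursive characterisation of the grouping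
def sg : List String → List (List (List String))
  | [] => [[]]
  | l :: rest =>
    if l == "\n" || l == "" then [] :: sg rest
    else
      match sg rest with
      | [] => [[setOfLine l]]
      | g :: t => (setOfLine l :: g) :: t

theorem sg_ne_nil (lines : List String) : sg lines ≠ [] := by
  cases lines with
  | nil => simp [sg]
  | cons l rest =>
    simp only [sg]
    split
    · simp
    · cases h : sg rest <;> simp

def sepsOf (lines : List String) : List Int :=
  ((PySem.List.enumerate lines).filter (fun p => p.2 == "\n" || p.2 == "")).map (fun p => p.1)

theorem enumerate_shift {α : Type} (xs : List α) (s : Int) :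
    PySem.List.enumerate xs (s + 1) = (PySem.List.enumerate xs s).map (fun p => (p.1 + 1, p.2)) := by
  induction xs generalizing s with
  | nil => simp [PySem.List.enumerate_nil]
  | cons x xs ih =>
    rw [PySem.List.enumerate_cons, PySem.List.enumerate_cons, ih (s + 1)]
    simp

theorem sepsOf_nil : sepsOf [] = [] := by simp [sepsOf, PySem.List.enumerate_nil]

theorem sepsOf_cons (l : String) (rest : List String) :
    sepsOf (l :: rest) =
      (if l == "\n" || l == "" then [(0 : Int)] else []) ++ (sepsOf rest).map (· + 1) := by
  unfold sepsOf
  rw [PySem.List.enumerate_cons, show (0 : Int) + 1 = 0 + 1 from rfl, enumerate_shift]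
  simp only [List.filter_cons, List.filter_map, List.map_map]
  split <;> simp [List.map_map, Function.comp_def]

theorem sepsOf_nonneg (lines : List String) : ∀ i ∈ sepsOf lines, 0 ≤ i := by
  intro i hi
  simp only [sepsOf, List.mem_map, List.mem_filter] at hi
  obtain ⟨p, ⟨hp, _⟩, rfl⟩ := hi
  rw [PySem.List.mem_enumerate_iff] at hp
  obtain ⟨k, hk, rfl⟩ := hp
  simp

theorem mem_stops_nonneg (rest : List String) :
    ∀ b ∈ sepsOf rest ++ [(rest.length : Int)], 0 ≤ b := by
  intro b hb
  rcases List.mem_append.mp hb with h | h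
  · exact sepsOf_nonneg rest b h
  · simp only [List.mem_singleton] at h; omega

theorem slice_cons_succ (l : String) (rest : List String) (a b : Int) (ha : 0 ≤ a) (hb : 0 ≤ b) :
    PySem.List.slice (l :: rest) (some (a + 1)) (some (b + 1)) =
      PySem.List.slice rest (some a) (some b) := by
  rw [PySem.List.slice_toNat _ (by omega) (by omega), PySem.List.slice_toNat _ ha hb]
  have h1 : (a + 1).toNat = a.toNat + 1 := by omega
  have h2 : (b + 1).toNat = b.toNat + 1 := by omega
  simp [h1, h2]

theorem slice_cons_zero (l : String) (rest : List String) (b : Int) (hb : 0 ≤ b) :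
    PySem.List.slice (l :: rest) (some 0) (some (b + 1)) =
      l :: PySem.List.slice rest (some 0) (some b) := by
  rw [PySem.List.slice_toNat _ le_rfl (by omega), PySem.List.slice_toNat _ le_rfl hb]
  have h2 : (b + 1).toNat = b.toNat + 1 := by omega
  simp [h2]

theorem alt_unfold (lines : List String) :
    separate_groups_alt lines =
      ((0 :: (sepsOf lines).map (fun s => s + 1)).zip (sepsOf lines ++ [(lines.length : Int)])).map
        (fun p => (PySem.List.slice lines (some p.1) (some p.2)).map setOfLine) := rfl

theorem alt_eq_sg (lines : List String) : separate_groups_alt lines = sg lines := by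
  induction lines with
  | nil =>
    rw [alt_unfold]
    simp [sg, sepsOf_nil, PySem.List.slice_toNat _ (le_refl (0 : Int)) (le_refl (0 : Int))]
  | cons l rest ih =>
    have hlen : (((l :: rest).length : ℕ) : Int) = (rest.length : Int) + 1 := by
      simp
    by_cases hsep : (l == "\n" || l == "") = true
    · rw [sg, if_pos hsep, ← ih, alt_unfold, alt_unfold, sepsOf_cons, if_pos hsep, hlen]
      simp only [List.map_cons, List.map_map, List.cons_append,
        List.nil_append]
      have hstarts : ((0 : Int) + 1) :: ((sepsOf rest).map ((fun s => s + 1) ∘ (fun s => s + 1))) =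
          ((0 : Int) :: (sepsOf rest).map (fun s => s + 1)).map (fun s => s + 1) := by
        simp [List.map_map]
      have hstops : (sepsOf rest).map (fun s => s + 1) ++ [(rest.length : Int) + 1] =
          (sepsOf rest ++ [(rest.length : Int)]).map (fun s => s + 1) := by
        simp
      rw [List.zip_cons_cons, List.map_cons, hstarts, hstops, List.zip_map, List.map_map]
      refine List.cons_eq_cons.mpr ⟨?_, ?_⟩
      · rw [show PySem.List.slice (l :: rest) (some ((0 : Int), (0 : Int)).1)
            (some ((0 : Int), (0 : Int)).2) =
            PySem.List.slice (l :: rest) (some (0 : Int)) (some (0 : Int)) from rfl,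
          PySem.List.slice_toNat _ (le_refl (0 : Int)) (le_refl (0 : Int))]
        simp
      · apply List.map_congr_left
        intro p hp
        obtain ⟨hp1, hp2⟩ := List.of_mem_zip hp
        have h1 : 0 ≤ p.1 := by
          rcases List.mem_cons.mp hp1 with h | h
          · omega
          · obtain ⟨s, hs, hse⟩ := List.mem_map.mp h
            have := sepsOf_nonneg rest s hs; omega
        have h2 : 0 ≤ p.2 := mem_stops_nonneg rest p.2 hp2
        show (PySem.List.slice (l :: rest) (some (p.1 + 1)) (some (p.2 + 1))).map setOfLine =
          (PySem.List.slice rest (some p.1) (some p.2)).map setOfLine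
        rw [slice_cons_succ l rest p.1 p.2 h1 h2]
    · rcases hSn : sepsOf rest ++ [(rest.length : Int)] with _ | ⟨y, ys⟩
      · simp at hSn
      have hy : 0 ≤ y := by
        have := mem_stops_nonneg rest y; rw [hSn] at this; exact this (by simp)
      have hys : ∀ b ∈ ys, 0 ≤ b := by
        intro b hb
        have := mem_stops_nonneg rest b; rw [hSn] at this; exact this (by simp [hb])
      have hsg : sg rest =
          ((PySem.List.slice rest (some 0) (some y)).map setOfLine) ::
            (((sepsOf rest).map (fun s => s + 1)).zip ys).map
              (fun p => (PySem.List.slice rest (some p.1) (some p.2)).map setOfLine) := by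
        rw [← ih, alt_unfold, hSn, List.zip_cons_cons, List.map_cons]
      rw [sg, if_neg (by simp_all), hsg, alt_unfold, sepsOf_cons, if_neg (by simp_all), hlen]
      simp only [List.nil_append, List.map_map]
      have hstops : ((sepsOf rest).map (fun s => s + 1)) ++ [(rest.length : Int) + 1] =
          (y + 1) :: ys.map (fun s => s + 1) := by
        have : ((sepsOf rest).map (fun s => s + 1)) ++ [(rest.length : Int) + 1] =
            (sepsOf rest ++ [(rest.length : Int)]).map (fun s => s + 1) := by simp
        rw [this, hSn, List.map_cons]
      rw [hstops, List.zip_cons_cons, List.map_cons]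
      refine List.cons_eq_cons.mpr ⟨?_, ?_⟩
      · show (PySem.List.slice (l :: rest) (some 0) (some (y + 1))).map setOfLine =
          setOfLine l :: (PySem.List.slice rest (some 0) (some y)).map setOfLine
        rw [slice_cons_zero l rest y hy, List.map_cons]
      · have hstarts : ((sepsOf rest).map ((fun s => s + 1) ∘ (fun s => s + 1))) =
            ((sepsOf rest).map (fun s => s + 1)).map (fun s => s + 1) := by
          simp [List.map_map]
        rw [hstarts, List.zip_map, List.map_map]
        apply List.map_congr_left
        intro p hp
        obtain ⟨hp1, hp2⟩ := List.of_mem_zip hp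
        have h1 : 0 ≤ p.1 := by
          obtain ⟨s, hs, hse⟩ := List.mem_map.mp hp1
          have := sepsOf_nonneg rest s hs; omega
        have h2 : 0 ≤ p.2 := hys p.2 hp2
        show (PySem.List.slice (l :: rest) (some (p.1 + 1)) (some (p.2 + 1))).map setOfLine =
          (PySem.List.slice rest (some p.1) (some p.2)).map setOfLine
        rw [slice_cons_succ l rest p.1 p.2 h1 h2]

def consHead (g : List (List String)) : List (List (List String)) → List (List (List String))
  | [] => [g]
  | h :: t => (g ++ h) :: t

def stepA (st : List (List String) × List (List (List String))) (line : String) :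
    List (List String) × List (List (List String)) :=
  if line == "\n" || line == "" then (([] : List (List String)), st.2 ++ [st.1])
  else (st.1 ++ [setOfLine line], st.2)

theorem foldA (lines : List String) : ∀ (g : List (List String)) (gs : List (List (List String))),
    (lines.foldl stepA (g, gs)).2 ++ [(lines.foldl stepA (g, gs)).1] =
      gs ++ consHead g (sg lines) := by
  induction lines with
  | nil => intro g gs; simp [consHead, sg]
  | cons l rest ih =>
    intro g gs
    simp only [List.foldl_cons]
    by_cases hsep : (l == "\n" || l == "") = true
    · rw [show stepA (g, gs) l = ([], gs ++ [g]) from by simp [stepA, hsep], ih,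
        sg, if_pos hsep]
      rcases h : sg rest with _ | ⟨h0, t⟩
      · exact absurd h (sg_ne_nil rest)
      · simp [consHead]
    · rw [show stepA (g, gs) l = (g ++ [setOfLine l], gs) from by simp [stepA, hsep], ih,
        sg, if_neg hsep]
      rcases h : sg rest with _ | ⟨h0, t⟩
      · exact absurd h (sg_ne_nil rest)
      · simp [consHead]

theorem a_eq_sg (lines : List String) : separate_groups lines = sg lines := by
  show (lines.foldl stepA ([], [])).2 ++ [(lines.foldl stepA ([], [])).1] = sg lines
  rw [foldA lines [] []]
  rcases h : sg lines with _ | ⟨h0, t⟩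
  · exact absurd h (sg_ne_nil lines)
  · simp [consHead]

-- ===== VERDICT (by name: the statement is the Claim_ definition above) =====
theorem separate_groups_spec : Claim_equal_separate_groups := by
  intro lines _
  unfold Spec_separate_groups
  rw [a_eq_sg, alt_eq_sg]
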